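-- pv_equiv track=rewrite | github.com/ZhaoyueSun/PHEE | evaluate/phee_metric.py | _compute_instance_token_stat
-- ===== SOURCE A (Python) =====
-- import collections
--
-- def _get_tokens(s):
--     if not s:
--         return []
--     return s.split()
--
-- def _compute_instance_token_stat(pred, gold):
--     """
--     @return:
--         num_same, pred_n, gold_n
--     """
--     gold_tokens = []
--     pred_tokens = []
--     for span in gold:
--         gold_tokens += _get_tokens(span)
--     for span in pred:
--         pred_tokens += _get_tokens(span)
--
--     gold_n = len(gold_tokens)
--     pred_n = len(pred_tokens)
--
--     common = collections.Counter(gold_tokens) & collections.Counter(pred_tokens)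
--     num_same = sum(common.values())
--
--     return num_same, pred_n, gold_n
-- ===== SOURCE B (Python) =====
-- def _get_tokens(s):
--     if not s:
--         return []
--     return s.split()
--
-- def _compute_instance_token_stat(pred, gold):
--     """
--     @return:
--         num_same, pred_n, gold_n
--     """
--     gold_tokens = [t for span in gold for t in _get_tokens(span)]
--     pred_tokens = [t for span in pred for t in _get_tokens(span)]
--
--     ps = sorted(pred_tokens)
--     gs = sorted(gold_tokens)
--     num_same = 0
--     i = 0
--     j = 0
--     while i < len(ps) and j < len(gs):
--         if ps[i] == gs[j]:
--             num_same += 1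
--             i += 1
--             j += 1
--         elif ps[i] < gs[j]:
--             i += 1
--         else:
--             j += 1
--
--     return num_same, len(pred_tokens), len(gold_tokens)
-- ===== Notes on version B (the rewrite author's own statement) =====
-- stated objective: alternative
-- what changed: B sorts both flattened token lists and counts the multiset overlap with a two-pointer merge scan, instead of building two hash Counters and summing their & intersection.
import Mathlib
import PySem

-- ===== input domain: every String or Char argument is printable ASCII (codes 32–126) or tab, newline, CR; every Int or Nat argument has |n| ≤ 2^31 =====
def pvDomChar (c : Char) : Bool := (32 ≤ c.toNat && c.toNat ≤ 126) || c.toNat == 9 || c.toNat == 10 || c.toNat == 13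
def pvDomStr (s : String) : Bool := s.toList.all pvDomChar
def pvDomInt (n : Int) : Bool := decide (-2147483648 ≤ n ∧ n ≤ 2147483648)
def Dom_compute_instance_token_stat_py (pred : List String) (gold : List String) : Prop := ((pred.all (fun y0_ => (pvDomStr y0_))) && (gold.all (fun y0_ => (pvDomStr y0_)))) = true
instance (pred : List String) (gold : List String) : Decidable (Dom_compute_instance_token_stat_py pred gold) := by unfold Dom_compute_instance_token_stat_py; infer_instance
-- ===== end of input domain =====

-- B replaces A's two hash Counters and `&` intersection by sorting both flattened token lists
-- and counting the multiset overlap with a two-pointer merge scan (objective: alternative).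

-- ===== PORT A =====
-- _get_tokens (shared by both Pythons verbatim)
def pvGetTokens (s : String) : List String :=
  if s = "" then [] else PySem.Str.split₀ s

def compute_instance_token_stat_py (pred : List String) (gold : List String) : Int × Int × Int :=
  let gold_tokens := gold.foldl (fun acc span => acc ++ pvGetTokens span) []
  let pred_tokens := pred.foldl (fun acc span => acc ++ pvGetTokens span) []
  let gold_n : Int := gold_tokens.length
  let pred_n : Int := pred_tokens.length
  let cg := PySem.Dict.counter gold_tokens
  let cp := PySem.Dict.counter pred_tokens
  -- Counter & Counter, ported by hand from CPython's Counter.__and__: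
  -- for elem, count in self.items(): keep min(count, other[elem]) when positive
  let common := cg.items.foldl (fun (d : PySem.Dict String Int) kv =>
      let other_count := cp.getD kv.1 0
      let newcount := if kv.2 < other_count then kv.2 else other_count
      if 0 < newcount then d.insert kv.1 newcount else d) PySem.Dict.empty
  let num_same := common.values.foldl (· + ·) 0
  (num_same, pred_n, gold_n)

-- ===== PORT B =====
-- the while-loop over the two sorted lists, as structural recursion on the two suffixes
def pvMerge : List String → List String → Int
  | [], _ => 0
  | _ :: _, [] => 0
  | p :: ps, g :: gs =>
    if p = g then 1 + pvMerge ps gs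
    else if p < g then pvMerge ps (g :: gs)
    else pvMerge (p :: ps) gs
termination_by ps gs => ps.length + gs.length
decreasing_by all_goals (simp only [List.length_cons]; omega)

def compute_instance_token_stat_py_alt (pred : List String) (gold : List String) : Int × Int × Int :=
  let gold_tokens := gold.flatMap pvGetTokens
  let pred_tokens := pred.flatMap pvGetTokens
  let ps := PySem.List.sorted pred_tokens (fun x => x) false
  let gs := PySem.List.sorted gold_tokens (fun x => x) false
  let num_same := pvMerge ps gs
  (num_same, (pred_tokens.length : Int), (gold_tokens.length : Int))

-- ===== PRECONDITION & SPEC =====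
def Spec_compute_instance_token_stat_py (pred : List String) (gold : List String) (out : Int × Int × Int) : Prop := out = compute_instance_token_stat_py_alt pred gold
instance (pred : List String) (gold : List String) (out : Int × Int × Int) : Decidable (Spec_compute_instance_token_stat_py pred gold out) := by unfold Spec_compute_instance_token_stat_py; infer_instance

-- ===== CLAIM (what is proved, stated in full; the proofs are below) =====
def Claim_equal_compute_instance_token_stat_py : Prop := ∀ (pred : List String) (gold : List String), Dom_compute_instance_token_stat_py pred gold → Spec_compute_instance_token_stat_py pred gold (compute_instance_token_stat_py pred gold)

-- ===== LEMMAS AND PROOFS =====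

theorem pv_foldl_append_flatMap (xs : List String) (acc : List String) :
    xs.foldl (fun acc span => acc ++ pvGetTokens span) acc = acc ++ xs.flatMap pvGetTokens := by
  induction xs generalizing acc with
  | nil => simp
  | cons x xs ih => simp [List.foldl_cons, ih, List.flatMap_cons]

theorem pv_sum_eq_foldl (l : List Int) : l.foldl (· + ·) 0 = l.sum := by
  simp [List.sum_eq_foldl]

theorem pv_if_min (a b : Int) : (if a < b then a else b) = min a b := by
  rw [min_def]; split_ifs <;> omega

-- B's merge scan on two sorted lists counts the cardinality of the multiset intersection
theorem pv_merge_eq_inter_card (ps gs : List String)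
    (hp : ps.Pairwise (· ≤ ·)) (hg : gs.Pairwise (· ≤ ·)) :
    pvMerge ps gs = (((ps : Multiset String)) ∩ (gs : Multiset String)).card := by
  induction ps, gs using pvMerge.induct with
  | case1 gs => simp [pvMerge]
  | case2 p ps => simp [pvMerge]
  | case3 ps g gs ih =>
    rw [pvMerge, if_pos rfl]
    have hmem : g ∈ (g ::ₘ (gs : Multiset String)) := by simp
    rw [← Multiset.cons_coe, ← Multiset.cons_coe, Multiset.cons_inter_of_pos _ hmem,
      Multiset.erase_cons_head, Multiset.card_cons]
    rw [ih (List.Pairwise.of_cons hp) (List.Pairwise.of_cons hg)]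
    push_cast; ring
  | case4 p ps g gs hne hlt ih =>
    rw [pvMerge, if_neg hne, if_pos hlt]
    have hnm : p ∉ ((g :: gs : List String) : Multiset String) := by
      simp only [Multiset.mem_coe, List.mem_cons]
      rintro (h | h)
      · exact hne h
      · have := (List.pairwise_cons.mp hg).1 p h
        exact absurd hlt (not_lt.mpr this)
    rw [← Multiset.cons_coe, Multiset.cons_inter_of_neg _ hnm]
    exact ih (List.Pairwise.of_cons hp) hg
  | case5 p ps g gs hne hge ih =>
    rw [pvMerge, if_neg hne, if_neg hge]
    have hgp : g < p := by
      rcases lt_trichotomy p g with h | h | h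
      · exact absurd h hge
      · exact absurd h hne
      · exact h
    have hnm : g ∉ ((p :: ps : List String) : Multiset String) := by
      simp only [Multiset.mem_coe, List.mem_cons]
      rintro (h | h)
      · exact ne_of_lt hgp h
      · have := (List.pairwise_cons.mp hp).1 g h
        exact absurd hgp (not_lt.mpr this)
    rw [Multiset.inter_comm, ← Multiset.cons_coe (l := gs), Multiset.cons_inter_of_neg _ hnm,
      Multiset.inter_comm]
    exact ih hp (List.Pairwise.of_cons hg)

-- the intersection cardinality is the min-of-counts sum over the distinct gold tokens
theorem pv_inter_card_sum (g p : List String) :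
    ((((p : Multiset String)) ∩ (g : Multiset String)).card : Int)
      = ∑ t ∈ g.toFinset, min (g.count t : Int) (p.count t : Int) := by
  rw [← Multiset.toFinset_sum_count_eq (((p : Multiset String)) ∩ g)]
  have hsub : (((p : Multiset String)) ∩ g).toFinset ⊆ g.toFinset := by
    intro x hx
    rw [Multiset.mem_toFinset, Multiset.mem_inter] at hx
    simpa [List.mem_toFinset] using hx.2
  rw [Finset.sum_subset hsub]
  · push_cast
    apply Finset.sum_congr rfl
    intro x _
    rw [Multiset.count_inter, Multiset.coe_count, Multiset.coe_count, min_comm]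
    push_cast; ring
  · intro x _ hx
    rw [Multiset.mem_toFinset] at hx
    exact Multiset.count_eq_zero.mpr hx

-- A's intersection fold: sum of the values of the built dict
theorem pv_inter_fold_sum (c : String → Int) (L : List (String × Int)) (d : PySem.Dict String Int)
    (hfresh : ∀ kv ∈ L, d.contains kv.1 = false) (hnd : (L.map Prod.fst).Nodup) :
    (L.foldl (fun (d : PySem.Dict String Int) kv =>
        if 0 < min kv.2 (c kv.1) then d.insert kv.1 (min kv.2 (c kv.1)) else d) d).values.sum
      = d.values.sum + (L.map (fun kv => if 0 < min kv.2 (c kv.1) then min kv.2 (c kv.1) else 0)).sum := by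
  induction L generalizing d with
  | nil => simp
  | cons kv L ih =>
    simp only [List.foldl_cons, List.map_cons, List.sum_cons]
    have hndL : (L.map Prod.fst).Nodup := (List.nodup_cons.mp hnd).2
    have hkv : kv.1 ∉ L.map Prod.fst := (List.nodup_cons.mp hnd).1
    by_cases h : 0 < min kv.2 (c kv.1)
    · rw [if_pos h, if_pos h]
      have hfresh' : ∀ p ∈ L, (d.insert kv.1 (min kv.2 (c kv.1))).contains p.1 = false := by
        intro p hp
        rw [PySem.Dict.contains_insert]
        have hne : (p.1 == kv.1) = false := by
          simp only [beq_eq_false_iff_ne, ne_eq]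
          intro he; exact hkv (he ▸ List.mem_map_of_mem hp)
        rw [hne, hfresh p (List.mem_cons_of_mem _ hp)]
        rfl
      rw [ih _ hfresh' hndL]
      have hvals : (d.insert kv.1 (min kv.2 (c kv.1))).values = d.values ++ [min kv.2 (c kv.1)] := by
        simp only [PySem.Dict.values]
        rw [PySem.Dict.items_insert, hfresh kv (List.mem_cons_self)]
        simp
      rw [hvals]; simp; ring
    · rw [if_neg h, if_neg h]
      rw [ih _ (fun p hp => hfresh p (List.mem_cons_of_mem _ hp)) hndL]
      ring

-- the core equality on flat token lists
theorem pv_core (g p : List String) :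
    ((PySem.Dict.counter g (κ := String)).items.foldl (fun (d : PySem.Dict String Int) kv =>
        let other_count := (PySem.Dict.counter p).getD kv.1 0
        let newcount := if kv.2 < other_count then kv.2 else other_count
        if 0 < newcount then d.insert kv.1 newcount else d) PySem.Dict.empty).values.foldl (· + ·) 0
      = pvMerge (PySem.List.sorted p (fun x => x) false) (PySem.List.sorted g (fun x => x) false) := by
  -- B side: merge of sorted lists = card of multiset intersection = min-of-counts sum
  have hp : (PySem.List.sorted p (fun x => x) false).Pairwise (· ≤ ·) := by
    simpa using PySem.List.sorted_pairwise p (fun x => x)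
  have hg : (PySem.List.sorted g (fun x => x) false).Pairwise (· ≤ ·) := by
    simpa using PySem.List.sorted_pairwise g (fun x => x)
  have hcp : ((PySem.List.sorted p (fun x => x) false : List String) : Multiset String) = (p : Multiset String) :=
    Multiset.coe_eq_coe.mpr (PySem.List.sorted_perm p (fun x => x) false)
  have hcg : ((PySem.List.sorted g (fun x => x) false : List String) : Multiset String) = (g : Multiset String) :=
    Multiset.coe_eq_coe.mpr (PySem.List.sorted_perm g (fun x => x) false)
  rw [pv_merge_eq_inter_card _ _ hp hg, hcp, hcg, pv_inter_card_sum]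
  -- A side
  simp only [pv_if_min, pv_sum_eq_foldl]
  have hstep : (fun (d : PySem.Dict String Int) (kv : String × Int) =>
      if 0 < min kv.2 ((PySem.Dict.counter p).getD kv.1 0) then
        d.insert kv.1 (min kv.2 ((PySem.Dict.counter p).getD kv.1 0)) else d)
      = fun d kv => if 0 < min kv.2 ((p.count kv.1 : Int)) then d.insert kv.1 (min kv.2 ((p.count kv.1 : Int))) else d := by
    funext d kv; rw [PySem.Dict.getD_counter]
  rw [hstep, pv_inter_fold_sum (fun k => (p.count k : Int)) _ PySem.Dict.empty
      (fun kv _ => PySem.Dict.contains_empty kv.1) ?nodup]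
  case nodup =>
    rw [PySem.Dict.items_counter, List.map_map]
    have he : (Prod.fst ∘ fun k => ((k, (g.count k : Int)) : String × Int)) = id := by
      funext k; rfl
    rw [he, List.map_id]
    simp
  · rw [PySem.Dict.items_counter, List.map_map]
    have hnd : (PySem.Set.ofList g).Nodup := by simp
    rw [← List.sum_toFinset _ hnd]
    have htf : (PySem.Set.ofList g).toFinset = g.toFinset := by
      apply Finset.ext; intro x
      simp [List.mem_toFinset, PySem.Set.mem_ofList]
    rw [htf]
    have h0 : (PySem.Dict.empty : PySem.Dict String Int).values = [] := rfl
    rw [h0]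
    simp only [List.sum_nil, zero_add]
    apply Finset.sum_congr rfl
    intro x _
    have h1 := Int.natCast_nonneg (g.count x)
    have h2 := Int.natCast_nonneg (p.count x)
    simp only [Function.comp]
    split_ifs <;> omega

-- ===== VERDICT (by name: the statement is the Claim_ definition above) =====
theorem compute_instance_token_stat_py_spec : Claim_equal_compute_instance_token_stat_py := by
  intro pred gold _
  unfold Spec_compute_instance_token_stat_py
  unfold compute_instance_token_stat_py compute_instance_token_stat_py_alt
  simp only [pv_foldl_append_flatMap, List.nil_append]
  rw [pv_core (gold.flatMap pvGetTokens) (pred.flatMap pvGetTokens)]
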